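-- pv_equiv track=rewrite | github.com/wurlinney/AISD | sem1/lab6/task4/task4.py | op_manager
-- ===== SOURCE A (Python) =====
-- class HashMap:
--     def __init__(self, size=100003):
--         self.size = size
--         self.table = [[] for _ in range(size)]
--         self.order = []
--
--     def _hash(self, key):
--         return hash(key) % self.size
--
--     def put(self, key, value):
--         index = self._hash(key)
--         table = self.table[index]
--         for i, (k, v) in enumerate(table):
--             if k == key:
--                 table[i] = (key, value)
--                 return
--         table.append((key, value))
--         self.order.append(key)
--
--     def get(self, key):
--         index = self._hash(key)
--         table = self.table[index]
--         for k, v in table: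
--             if k == key:
--                 return v
--         return "<none>"
--
--     def delete(self, key):
--         index = self._hash(key)
--         table = self.table[index]
--         for i, (k, v) in enumerate(table):
--             if k == key:
--                 del table[i]
--                 self.order.remove(key)
--                 return
--
--     def prev(self, key):
--         if key not in self.order:
--             return "<none>"
--         index = self.order.index(key)
--         if index > 0:
--             prev_key = self.order[index - 1]
--             return self.get(prev_key)
--         return "<none>"
--
--     def next(self, key):
--         if key not in self.order:
--             return "<none>"
--         index = self.order.index(key)
--         if index < len(self.order) - 1:
--             next_key = self.order[index + 1]
--             return self.get(next_key)
--         return "<none>"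
--
-- def op_manager(operations):
--     result = []
--     hash_map = HashMap()
--     for operation in operations:
--         parts = operation.strip().split()
--         command = parts[0]
--
--         if command == "put":
--             key, value = parts[1], parts[2]
--             hash_map.put(key, value)
--         elif command == "get":
--             key = parts[1]
--             result.append(hash_map.get(key))
--         elif command == "delete":
--             key = parts[1]
--             hash_map.delete(key)
--         elif command == "prev":
--             key = parts[1]
--             result.append(hash_map.prev(key))
--         elif command == "next":
--             key = parts[1]
--             result.append(hash_map.next(key))
--
--     return result
-- ===== SOURCE B (Python) =====
-- def op_manager(operations):
--     # Doubly-linked list threaded through the keys (prev/next pointer dicts + tail pointer):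
--     # prev/next/delete become pointer lookups/splices instead of scans of an order list.
--     val = {}
--     prv = {}
--     nxt = {}
--     last = None
--     out = []
--     for operation in operations:
--         parts = operation.split()
--         command = parts[0]
--         if command == "put":
--             key, value = parts[1], parts[2]
--             if key in val:
--                 val[key] = value
--             else:
--                 val[key] = value
--                 prv[key] = last
--                 nxt[key] = None
--                 if last is not None:
--                     nxt[last] = key
--                 last = key
--         elif command == "get":
--             out.append(val.get(parts[1], "<none>"))
--         elif command == "delete":
--             key = parts[1]
--             if key in val:
--                 p, n = prv[key], nxt[key]
--                 if p is not None:
--                     nxt[p] = n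
--                 if n is not None:
--                     prv[n] = p
--                 else:
--                     last = p
--                 del val[key]
--                 del prv[key]
--                 del nxt[key]
--         elif command == "prev":
--             key = parts[1]
--             p = prv.get(key)
--             out.append(val.get(p, "<none>") if key in val and p is not None else "<none>")
--         elif command == "next":
--             key = parts[1]
--             n = nxt.get(key)
--             out.append(val.get(n, "<none>") if key in val and n is not None else "<none>")
--     return out
-- ===== Notes on version B (the rewrite author's own statement) =====
-- stated objective: alternative
-- what changed: Replaces A's bucket hash table plus separate insertion-order list (prev/next/delete scan that list linearly, and every call allocates 100003 buckets) with a doubly-linked list threaded through the keys: a value dict plus prev/next pointer dicts and a tail pointer, so prev/next/delete become pointer lookups and splices instead of list scans.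
import Mathlib
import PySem

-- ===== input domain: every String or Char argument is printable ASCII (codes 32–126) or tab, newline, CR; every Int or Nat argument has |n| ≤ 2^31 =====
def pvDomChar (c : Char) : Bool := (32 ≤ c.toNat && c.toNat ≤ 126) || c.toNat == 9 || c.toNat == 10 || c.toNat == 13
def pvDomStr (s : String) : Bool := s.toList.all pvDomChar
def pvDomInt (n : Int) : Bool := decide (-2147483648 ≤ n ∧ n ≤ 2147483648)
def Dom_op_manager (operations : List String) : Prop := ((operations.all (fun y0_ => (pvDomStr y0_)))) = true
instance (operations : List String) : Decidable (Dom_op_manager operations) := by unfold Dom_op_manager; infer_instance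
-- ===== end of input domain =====

-- B threads a doubly-linked list through the keys (prev/next pointer dicts + tail pointer), so
-- prev/next/delete are pointer lookups/splices instead of A's scans of an order list (alternative
-- algorithm; the order list and its linear scans disappear).

-- ===== PORT A =====
-- CPython's hash() is salted per process and is not portable; op_manager's output does not depend
-- on the hash values (a hash only selects a bucket, all behaviour inside a bucket is key equality),
-- so the hash value is ported as a constant while every step of the bucket machinery is kept.
def pyHashA (_key : String) : Int := 0

def hmHashIdx (key : String) : Int := PySem.Int.mod (pyHashA key) 100003

-- the 'for i, (k, v) in enumerate(table): if k == key: table[i] = (key, value); return' scan of put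
-- (none = key not found in the bucket)
def bucketPutA (key value : String) : List (String × String) → Option (List (String × String))
  | [] => none
  | (k, v) :: rest =>
      if k = key then some ((key, value) :: rest)
      else (bucketPutA key value rest).map (fun b => (k, v) :: b)

-- the scan of get
def bucketGetA (key : String) : List (String × String) → String
  | [] => "<none>"
  | (k, v) :: rest => if k = key then v else bucketGetA key rest

-- the 'del table[i]' scan of delete (none = key not found)
def bucketDelA (key : String) : List (String × String) → Option (List (String × String))
  | [] => none
  | (k, _v) :: rest =>
      if k = key then some rest
      else (bucketDelA key rest).map (fun b => (k, _v) :: b)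

def hmPutA (tbl : PySem.Dict Int (List (String × String))) (order : List String)
    (key value : String) : PySem.Dict Int (List (String × String)) × List String :=
  let idx := hmHashIdx key
  let bucket := tbl.getD idx []
  match bucketPutA key value bucket with
  | some b => (tbl.insert idx b, order)
  | none => (tbl.insert idx (bucket ++ [(key, value)]), order ++ [key])

def hmGetA (tbl : PySem.Dict Int (List (String × String))) (key : String) : String :=
  bucketGetA key (tbl.getD (hmHashIdx key) [])

def hmDelA (tbl : PySem.Dict Int (List (String × String))) (order : List String)
    (key : String) : PySem.Dict Int (List (String × String)) × List String :=
  let idx := hmHashIdx key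
  let bucket := tbl.getD idx []
  match bucketDelA key bucket with
  -- self.order.remove(key): its ValueError branch is unreachable (a key found in a bucket is in order)
  | some b => (tbl.insert idx b, (PySem.List.remove? order key).getD order)
  | none => (tbl, order)

def hmPrevA (tbl : PySem.Dict Int (List (String × String))) (order : List String)
    (key : String) : String :=
  if key ∈ order then
    match PySem.List.index? order key with
    | some i => if 0 < i then (order[i - 1]?).elim "<none>" (hmGetA tbl) else "<none>"
    | none => "<none>"   -- unreachable: key ∈ order
  else "<none>"

def hmNextA (tbl : PySem.Dict Int (List (String × String))) (order : List String)
    (key : String) : String :=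
  if key ∈ order then
    match PySem.List.index? order key with
    | some i => if i < order.length - 1 then (order[i + 1]?).elim "<none>" (hmGetA tbl) else "<none>"
    | none => "<none>"   -- unreachable: key ∈ order
  else "<none>"

def stepA (st : (PySem.Dict Int (List (String × String)) × List String) × List String)
    (operation : String) :
    (PySem.Dict Int (List (String × String)) × List String) × List String :=
  let tbl := st.1.1
  let order := st.1.2
  let res := st.2
  let parts := PySem.Str.split₀ (PySem.Str.strip operation)
  match PySem.List.pyGet? parts 0 with
  | none => st   -- parts[0]: IndexError, outside Pre_
  | some command =>
    if command = "put" then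
      match PySem.List.pyGet? parts 1, PySem.List.pyGet? parts 2 with
      | some key, some value => (hmPutA tbl order key value, res)
      | _, _ => st   -- IndexError, outside Pre_
    else if command = "get" then
      match PySem.List.pyGet? parts 1 with
      | some key => ((tbl, order), res ++ [hmGetA tbl key])
      | none => st
    else if command = "delete" then
      match PySem.List.pyGet? parts 1 with
      | some key => (hmDelA tbl order key, res)
      | none => st
    else if command = "prev" then
      match PySem.List.pyGet? parts 1 with
      | some key => ((tbl, order), res ++ [hmPrevA tbl order key])
      | none => st
    else if command = "next" then
      match PySem.List.pyGet? parts 1 with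
      | some key => ((tbl, order), res ++ [hmNextA tbl order key])
      | none => st
    else st

def op_manager (operations : List String) : List String :=
  (operations.foldl stepA ((PySem.Dict.empty, []), [])).2

-- ===== PORT B =====
-- B-side helpers: 'if o is not None: d[o] = v' / 'last if n is not None else p' / 'val.get(o, "<none>")'
def insOpt (d : PySem.Dict String (Option String)) (o : Option String) (v : Option String) :
    PySem.Dict String (Option String) :=
  match o with
  | some x => d.insert x v
  | none => d

def newLast (n last p : Option String) : Option String :=
  match n with
  | some _ => last
  | none => p

def lookupOpt (val : PySem.Dict String String) (o : Option String) : String :=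
  match o with
  | some k => val.getD k "<none>"
  | none => "<none>"

-- B's state: val = the values, prv/nxt = the linked-list pointers (None at the ends), last = tail.
def stepB (st : (PySem.Dict String String × PySem.Dict String (Option String) ×
      PySem.Dict String (Option String) × Option String) × List String) (operation : String) :
    (PySem.Dict String String × PySem.Dict String (Option String) ×
      PySem.Dict String (Option String) × Option String) × List String :=
  let val := st.1.1
  let prv := st.1.2.1
  let nxt := st.1.2.2.1
  let last := st.1.2.2.2
  let out := st.2
  let parts := PySem.Str.split₀ operation
  match PySem.List.pyGet? parts 0 with
  | none => st   -- parts[0]: IndexError, outside Pre_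
  | some command =>
    if command = "put" then
      match PySem.List.pyGet? parts 1, PySem.List.pyGet? parts 2 with
      | some key, some value =>
        if val.contains key then ((val.insert key value, prv, nxt, last), out)
        else
          -- append key at the tail of the linked list
          let prv' := prv.insert key last
          let nxt' := nxt.insert key none
          let nxt'' := insOpt nxt' last (some key)   -- if last is not None: nxt[last] = key
          ((val.insert key value, prv', nxt'', some key), out)
      | _, _ => st   -- IndexError, outside Pre_
    else if command = "get" then
      match PySem.List.pyGet? parts 1 with
      | some key => ((val, prv, nxt, last), out ++ [val.getD key "<none>"])
      | none => st
    else if command = "delete" then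
      match PySem.List.pyGet? parts 1 with
      | some key =>
        if val.contains key then
          match prv.get? key, nxt.get? key with
          | some p, some n =>
            -- splice the node out of the linked list
            let nxt₁ := insOpt nxt p n       -- if p is not None: nxt[p] = n
            let prv₁ := insOpt prv n p       -- if n is not None: prv[n] = p
            let last' := newLast n last p    -- else: last = p
            ((val.erase key, prv₁.erase key, nxt₁.erase key, last'), out)
          | _, _ => st   -- KeyError: unreachable, every key in val has pointer entries
        else ((val, prv, nxt, last), out)
      | none => st
    else if command = "prev" then
      match PySem.List.pyGet? parts 1 with
      | some key =>
        let p := prv.getD key none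
        let v := if val.contains key then lookupOpt val p else "<none>"
        ((val, prv, nxt, last), out ++ [v])
      | none => st
    else if command = "next" then
      match PySem.List.pyGet? parts 1 with
      | some key =>
        let n := nxt.getD key none
        let v := if val.contains key then lookupOpt val n else "<none>"
        ((val, prv, nxt, last), out ++ [v])
      | none => st
    else st

def op_manager_alt (operations : List String) : List String :=
  (operations.foldl stepB ((PySem.Dict.empty, PySem.Dict.empty, PySem.Dict.empty, none), [])).2

-- ===== PRECONDITION & SPEC =====
-- Pre_ excludes exactly the operations on which Python A raises IndexError: an operation whose
-- split is empty (parts[0]), or a known command missing its key/value arguments.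
def Pre_op_manager (operations : List String) : Prop :=
  ∀ op ∈ operations,
    PySem.Str.split₀ op ≠ [] ∧
    ((PySem.Str.split₀ op).head? = some "put" → 3 ≤ (PySem.Str.split₀ op).length) ∧
    (((PySem.Str.split₀ op).head? = some "get" ∨ (PySem.Str.split₀ op).head? = some "delete" ∨
      (PySem.Str.split₀ op).head? = some "prev" ∨ (PySem.Str.split₀ op).head? = some "next") →
      2 ≤ (PySem.Str.split₀ op).length)

instance (operations : List String) : Decidable (Pre_op_manager operations) := by
  unfold Pre_op_manager; infer_instance

def pvWitness_op_manager : List String :=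
  ["put a 1", "put b 2", "get a", "prev b", "next a", "delete a", "get a", "prev b"]

def Spec_op_manager (operations : List String) (out : List String) : Prop :=
  out = op_manager_alt operations
instance (operations : List String) (out : List String) : Decidable (Spec_op_manager operations out) := by
  unfold Spec_op_manager; infer_instance

-- ===== CLAIM (what is proved, stated in full; the proofs are below) =====
def Claim_equal_op_manager : Prop :=
  ∀ (operations : List String), Dom_op_manager operations → Pre_op_manager operations →
    Spec_op_manager operations (op_manager operations)

-- ===== LEMMAS AND PROOFS =====

-- B's linked list is correct for the key sequence ks: the tail pointer is the last key, and for
-- every decomposition ks = pre ++ k :: suf the pointers of k are the last of pre / head of suf.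
def LinkOK (prv nxt : PySem.Dict String (Option String)) (last : Option String)
    (ks : List String) : Prop :=
  last = ks.getLast? ∧
  ∀ pre k suf, ks = pre ++ k :: suf →
    prv.get? k = some pre.getLast? ∧ nxt.get? k = some suf.head?

-- the simulation invariant: A's single live bucket is B's item list, A's order list is B's key
-- list, and B's pointer dicts link up B's key list
def SimRel (tbl : PySem.Dict Int (List (String × String))) (order : List String)
    (val : PySem.Dict String String) (prv nxt : PySem.Dict String (Option String))
    (last : Option String) : Prop :=
  tbl.getD 0 [] = val.items ∧ order = val.keys ∧ val.keys.Nodup ∧ LinkOK prv nxt last val.keys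

theorem hmHashIdx_eq (key : String) : hmHashIdx key = 0 := by
  simp only [hmHashIdx, pyHashA]; decide

-- s.strip().split() = s.split(): leading/trailing whitespace never contributes a word
theorem go_nil (cur : List Char) (acc : List (List Char)) :
    PySem.Chars.split₀.go [] cur acc =
      if cur.isEmpty then acc.reverse else (cur.reverse :: acc).reverse := by
  simp [PySem.Chars.split₀.go]

theorem go_cons (c : Char) (t cur : List Char) (acc : List (List Char)) :
    PySem.Chars.split₀.go (c :: t) cur acc =
      if PySem.Chars.isspace c then
        (if cur.isEmpty then PySem.Chars.split₀.go t [] acc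
         else PySem.Chars.split₀.go t [] (cur.reverse :: acc))
      else PySem.Chars.split₀.go t (c :: cur) acc := by
  simp [PySem.Chars.split₀.go]

theorem go_all_space (ws : List Char) (hws : ∀ c ∈ ws, PySem.Chars.isspace c = true)
    (cur : List Char) (acc : List (List Char)) :
    PySem.Chars.split₀.go ws cur acc = PySem.Chars.split₀.go [] cur acc := by
  revert hws cur acc
  induction ws with
  | nil => intro _ cur acc; rfl
  | cons c ws ih =>
      intro hws cur acc
      have hc : PySem.Chars.isspace c = true := hws c List.mem_cons_self
      have hws' : ∀ x ∈ ws, PySem.Chars.isspace x = true :=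
        fun x hx => hws x (List.mem_cons_of_mem c hx)
      rw [go_cons, if_pos hc]
      by_cases hcur : cur.isEmpty
      · rw [if_pos hcur, ih hws' [] acc, go_nil, go_nil]
        simp [hcur]
      · rw [if_neg hcur, ih hws' [] (cur.reverse :: acc), go_nil, go_nil]
        simp [hcur]

theorem go_append_space (l ws : List Char) (hws : ∀ c ∈ ws, PySem.Chars.isspace c = true)
    (cur : List Char) (acc : List (List Char)) :
    PySem.Chars.split₀.go (l ++ ws) cur acc = PySem.Chars.split₀.go l cur acc := by
  induction l generalizing cur acc with
  | nil => exact go_all_space ws hws cur acc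
  | cons c l ih =>
      rw [List.cons_append, go_cons, go_cons]
      split_ifs <;> apply ih

theorem go_dropWhile (l : List Char) (acc : List (List Char)) :
    PySem.Chars.split₀.go (List.dropWhile PySem.Chars.isspace l) [] acc =
    PySem.Chars.split₀.go l [] acc := by
  induction l generalizing acc with
  | nil => rfl
  | cons c l ih =>
      by_cases hc : PySem.Chars.isspace c
      · rw [List.dropWhile_cons_of_pos hc, ih, go_cons, if_pos hc]
        rfl
      · rw [List.dropWhile_cons_of_neg hc]

theorem split0_strip (s : String) :
    PySem.Str.split₀ (PySem.Str.strip s) = PySem.Str.split₀ s := by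
  unfold PySem.Str.split₀
  congr 1
  rw [PySem.Str.toList_strip]
  show PySem.Chars.split₀ (PySem.Chars.strip s.toList) = PySem.Chars.split₀ s.toList
  unfold PySem.Chars.strip PySem.Chars.split₀
  set m := PySem.Chars.lstrip s.toList with hm
  have hdecomp : m = PySem.Chars.rstrip m ++ (List.takeWhile PySem.Chars.isspace m.reverse).reverse := by
    conv_lhs => rw [← List.reverse_reverse m,
      ← List.takeWhile_append_dropWhile (p := PySem.Chars.isspace) (l := m.reverse)]
    rw [List.reverse_append]
    rfl
  have hws : ∀ c ∈ (List.takeWhile PySem.Chars.isspace m.reverse).reverse,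
      PySem.Chars.isspace c = true := by
    intro c hcm
    exact List.mem_takeWhile_imp (List.mem_reverse.mp hcm)
  rw [show PySem.Chars.split₀.go (PySem.Chars.rstrip m) [] [] =
      PySem.Chars.split₀.go (PySem.Chars.rstrip m ++
        (List.takeWhile PySem.Chars.isspace m.reverse).reverse) [] [] from
      (go_append_space _ _ hws [] []).symm, ← hdecomp, hm]
  exact go_dropWhile s.toList []

-- the bucket scans, characterised against the dict operations
theorem bucketGetA_eq (key : String) (l : List (String × String)) :
    bucketGetA key l = (PySem.Dict.mk l).getD key "<none>" := by
  induction l with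
  | nil => rfl
  | cons p l ih =>
      obtain ⟨k, v⟩ := p
      by_cases hk : k = key
      · simp [bucketGetA, hk, PySem.Dict.getD, PySem.Dict.get?]
      · rw [show bucketGetA key ((k, v) :: l) = bucketGetA key l from by simp [bucketGetA, hk], ih]
        simp [PySem.Dict.getD, PySem.Dict.get?, hk]

theorem map_untouched (key value : String) (l : List (String × String))
    (h : key ∉ l.map (fun p => p.1)) :
    l.map (fun p => if (p.1 == key) = true then (key, value) else p) = l := by
  induction l with
  | nil => rfl
  | cons p l ih =>
      simp only [List.map_cons, List.mem_cons, not_or] at h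
      have h1 : (p.1 == key) = false := beq_eq_false_iff_ne.mpr (fun hp => h.1 hp.symm)
      rw [List.map_cons, if_neg (by simp [h1]), ih h.2]

theorem bucketPutA_not_mem (key value : String) (l : List (String × String))
    (h : key ∉ l.map (fun p => p.1)) : bucketPutA key value l = none := by
  induction l with
  | nil => rfl
  | cons p l ih =>
      simp only [List.map_cons, List.mem_cons, not_or] at h
      obtain ⟨k, v⟩ := p
      have h1 : k ≠ key := fun hp => h.1 hp.symm
      simp [bucketPutA, h1, ih h.2]

theorem bucketPutA_mem (key value : String) (l : List (String × String))
    (hnd : (l.map (fun p => p.1)).Nodup) (h : key ∈ l.map (fun p => p.1)) :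
    bucketPutA key value l =
      some (l.map (fun p => if (p.1 == key) = true then (key, value) else p)) := by
  induction l with
  | nil => simp at h
  | cons p l ih =>
      obtain ⟨k, v⟩ := p
      simp only [List.map_cons, List.nodup_cons] at hnd
      by_cases hk : k = key
      · subst hk
        have hmap : ((k, v) :: l).map (fun p => if (p.1 == k) = true then (k, value) else p) =
            (k, value) :: l := by
          rw [List.map_cons, if_pos (by simp), map_untouched k value l hnd.1]
        rw [hmap]
        simp [bucketPutA]
      · have h' : key ∈ l.map (fun p => p.1) := by
          rcases List.mem_cons.mp h with h0 | h0
          · exact absurd h0.symm hk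
          · exact h0
        rw [show bucketPutA key value ((k, v) :: l) =
            (bucketPutA key value l).map (fun b => (k, v) :: b) from by simp [bucketPutA, hk],
          ih hnd.2 h', Option.map_some, List.map_cons, if_neg (by simp [hk])]

theorem bucketDelA_not_mem (key : String) (l : List (String × String))
    (h : key ∉ l.map (fun p => p.1)) : bucketDelA key l = none := by
  induction l with
  | nil => rfl
  | cons p l ih =>
      simp only [List.map_cons, List.mem_cons, not_or] at h
      obtain ⟨k, v⟩ := p
      have h1 : k ≠ key := fun hp => h.1 hp.symm
      simp [bucketDelA, h1, ih h.2]

theorem bucketDelA_mem (key : String) (l : List (String × String))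
    (hnd : (l.map (fun p => p.1)).Nodup) (h : key ∈ l.map (fun p => p.1)) :
    bucketDelA key l = some (l.filter (fun p => !(p.1 == key))) ∧
    (l.map (fun p => p.1)).erase key = (l.filter (fun p => !(p.1 == key))).map (fun p => p.1) := by
  induction l with
  | nil => simp at h
  | cons p l ih =>
      obtain ⟨k, v⟩ := p
      simp only [List.map_cons, List.nodup_cons] at hnd
      by_cases hk : k = key
      · subst hk
        have hnot : k ∉ l.map (fun p => p.1) := hnd.1
        have hfilter : l.filter (fun p => !(p.1 == k)) = l := by
          rw [List.filter_eq_self]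
          intro p hp
          simp only [Bool.not_eq_eq_eq_not, Bool.not_true, beq_eq_false_iff_ne, ne_eq]
          exact fun hpk => hnot (hpk ▸ List.mem_map_of_mem hp)
        constructor
        · simp [bucketDelA, hfilter]
        · simp [hfilter, List.erase_cons_head]
      · have h' : key ∈ l.map (fun p => p.1) := by
          rcases List.mem_cons.mp h with h0 | h0
          · exact absurd h0.symm hk
          · exact h0
        obtain ⟨ih1, ih2⟩ := ih hnd.2 h'
        have hkb : (k == key) = false := by simp [hk]
        have hfil : ((k, v) :: l).filter (fun p => !(p.1 == key)) =
            (k, v) :: l.filter (fun p => !(p.1 == key)) := by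
          simp [hkb]
        constructor
        · rw [show bucketDelA key ((k, v) :: l) =
              (bucketDelA key l).map (fun b => (k, v) :: b) from by simp [bucketDelA, hk],
            ih1, Option.map_some, hfil]
        · rw [List.map_cons, List.erase_cons_tail (by simp [hk]), hfil, List.map_cons, ih2]

-- get? survives erasing another key (first-match over the filtered item list is unchanged)
theorem find?_filter_ne {ν : Type} (items : List (String × ν)) (k k' : String) (h : k' ≠ k) :
    (List.filter (fun p => !(p.1 == k)) items).find? (fun p => p.1 == k') =
      items.find? (fun p => p.1 == k') := by
  induction items with
  | nil => rfl
  | cons p rest ih =>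
      by_cases hp : p.1 = k
      · have hb : (!(p.1 == k)) = false := by simp [hp]
        have hne : ¬((p.1 == k') = true) := by
          simp only [beq_iff_eq, hp]
          exact fun he => h he.symm
        rw [List.filter_cons, hb]
        simp only [Bool.false_eq_true, if_false]
        rw [List.find?_cons_of_neg (p := fun q : String × ν => q.1 == k') hne, ih]
      · have hb : (!(p.1 == k)) = true := by simp [hp]
        rw [List.filter_cons, hb, if_pos rfl]
        by_cases h2 : p.1 = k'
        · rw [List.find?_cons_of_pos (p := fun q : String × ν => q.1 == k') (by simp [h2]),
            List.find?_cons_of_pos (p := fun q : String × ν => q.1 == k') (by simp [h2])]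
        · rw [List.find?_cons_of_neg (p := fun q : String × ν => q.1 == k') (by simp [h2]),
            List.find?_cons_of_neg (p := fun q : String × ν => q.1 == k') (by simp [h2]), ih]

theorem get?_erase_of_ne {ν : Type} (d : PySem.Dict String ν) (k k' : String) (h : k' ≠ k) :
    (d.erase k).get? k' = d.get? k' := by
  show ((List.filter _ d.items).find? _).map _ = (d.items.find? _).map _
  rw [find?_filter_ne d.items k k' h]

-- the pieces of a Nodup list around a distinguished element
theorem nodup_mid {pre suf : List String} {k : String} (h : (pre ++ k :: suf).Nodup) :
    k ∉ pre ∧ k ∉ suf ∧ pre.Nodup ∧ suf.Nodup ∧ ∀ a ∈ pre, a ∉ suf := by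
  simp only [List.nodup_append, List.nodup_cons] at h
  obtain ⟨h1, ⟨h2, h3⟩, h4⟩ := h
  exact ⟨fun hk => h4 k hk k List.mem_cons_self rfl, h2, h1, h3,
    fun a ha hs => h4 a ha a (List.mem_cons_of_mem _ hs) rfl⟩

theorem getLast?_append_of_ne_nil (x : List String) {t : List String} (ht : t ≠ []) :
    (x ++ t).getLast? = t.getLast? := by
  rw [List.getLast?_append, Option.or_of_isSome (List.getLast?_isSome.mpr ht)]

theorem head?_append_of_ne_nil {t : List String} (y : List String) (ht : t ≠ []) :
    (t ++ y).head? = t.head? := by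
  rw [List.head?_append, Option.or_of_isSome]
  cases t with
  | nil => exact absurd rfl ht
  | cons a t => rfl

-- how a concatenation l ++ [x] decomposes around an element
theorem concat_decomp {l : List String} {x : String} {pre suf : List String} {k : String}
    (h : l ++ [x] = pre ++ k :: suf) :
    (pre = l ∧ k = x ∧ suf = []) ∨ ∃ t, l = pre ++ k :: t ∧ suf = t ++ [x] := by
  rcases suf.eq_nil_or_concat with rfl | ⟨t, s, rfl⟩
  · obtain ⟨h1, h2⟩ := List.append_inj' h rfl
    obtain ⟨hx, -⟩ := List.cons_eq_cons.mp h2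
    exact Or.inl ⟨h1.symm, hx.symm, rfl⟩
  · simp only [List.concat_eq_append] at h ⊢
    rw [show pre ++ k :: (t ++ [s]) = (pre ++ k :: t) ++ [s] from by simp] at h
    obtain ⟨h1, h2⟩ := List.append_inj' h rfl
    obtain ⟨hs, -⟩ := List.cons_eq_cons.mp h2.symm
    exact Or.inr ⟨t, h1, by rw [hs]⟩

-- appending a fresh key at the tail preserves the linked-list invariant
theorem putB_link (prv nxt : PySem.Dict String (Option String)) (last : Option String)
    (ks : List String) (key : String) (hnew : key ∉ ks) (hnd : ks.Nodup)
    (hlink : LinkOK prv nxt last ks) :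
    LinkOK (prv.insert key last) (insOpt (nxt.insert key none) last (some key))
      (some key) (ks ++ [key]) := by
  obtain ⟨hlast, hptr⟩ := hlink
  refine ⟨List.getLast?_concat.symm, ?_⟩
  intro pre k suf hdec
  rcases concat_decomp hdec with ⟨hpre, hk, hsuf⟩ | ⟨t, hl, hsuf⟩
  · subst hpre; subst hk; subst hsuf
    constructor
    · rw [PySem.Dict.get?_insert_self, hlast]
    · cases hl : last with
      | none =>
          simp only [insOpt]
          rw [PySem.Dict.get?_insert_self]
          rfl
      | some l =>
          rw [hl] at hlast
          have hlmem : l ∈ pre := by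
            obtain ⟨ys, hys⟩ := List.getLast?_eq_some_iff.mp hlast.symm
            rw [hys]; exact List.mem_append.mpr (Or.inr List.mem_cons_self)
          have hne : k ≠ l := fun he => hnew (he ▸ hlmem)
          simp only [insOpt]
          rw [PySem.Dict.get?_insert_of_ne _ _ hne, PySem.Dict.get?_insert_self]
          rfl
  · -- k is an old key: ks = pre ++ k :: t, suf = t ++ [key]
    have hkold : k ∈ ks := by rw [hl]; exact List.mem_append.mpr (Or.inr List.mem_cons_self)
    have hkne : k ≠ key := fun he => hnew (he ▸ hkold)
    obtain ⟨hp, hn⟩ := hptr pre k t hl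
    constructor
    · rw [PySem.Dict.get?_insert_of_ne _ _ hkne, hp]
    · subst hsuf
      rcases List.eq_nil_or_concat t with rfl | ⟨t₀, tl, rfl⟩
      · -- k was the tail: last = some k
        have hlk : last = some k := by rw [hlast, hl]; simp
        rw [hlk]; simp only [insOpt]
        rw [PySem.Dict.get?_insert_self]
        rfl
      · -- k has a successor inside t: its pointer is untouched
        simp only [List.concat_eq_append] at *
        have hlv : last = some tl := by
          rw [hlast, hl, show pre ++ k :: (t₀ ++ [tl]) = (pre ++ k :: t₀) ++ [tl] from by simp,
            List.getLast?_concat]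
        have hknet : k ∉ t₀ ++ [tl] := by
          have hnd' : (pre ++ k :: (t₀ ++ [tl])).Nodup := by rw [← hl]; exact hnd
          exact (nodup_mid hnd').2.1
        have hktl : k ≠ tl := fun he =>
          hknet (he ▸ List.mem_append.mpr (Or.inr List.mem_cons_self))
        rw [hlv]; simp only [insOpt]
        rw [PySem.Dict.get?_insert_of_ne _ _ hktl, PySem.Dict.get?_insert_of_ne _ _ hkne, hn,
          head?_append_of_ne_nil [key] (by simp)]

-- splicing a key out preserves the linked-list invariant
theorem delB_link (prv nxt : PySem.Dict String (Option String)) (last : Option String)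
    (pre suf : List String) (key : String) (hnd : (pre ++ key :: suf).Nodup)
    (hlink : LinkOK prv nxt last (pre ++ key :: suf)) :
    LinkOK ((insOpt prv suf.head? pre.getLast?).erase key)
      ((insOpt nxt pre.getLast? suf.head?).erase key)
      (newLast suf.head? last pre.getLast?)
      (pre ++ suf) := by
  obtain ⟨hlast, hptr⟩ := hlink
  obtain ⟨hkp, hks, hpnd, hsnd, hdisj⟩ := nodup_mid hnd
  constructor
  · -- the tail pointer
    cases suf with
    | nil => simp [newLast]
    | cons a s =>
        simp only [List.head?_cons, newLast]
        rw [hlast, getLast?_append_of_ne_nil pre (by simp),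
          show (key :: a :: s).getLast? = (a :: s).getLast? from
            getLast?_append_of_ne_nil [key] (List.cons_ne_nil a s),
          getLast?_append_of_ne_nil pre (List.cons_ne_nil a s)]
  · intro pre₂ k₂ suf₂ hdec
    rcases List.append_eq_append_iff.mp hdec with ⟨cs, hc1, hc2⟩ | ⟨bs, hb1, hb2⟩
    · -- k₂ ∈ suf : pre₂ = pre ++ cs, suf = cs ++ k₂ :: suf₂
      have hk2s : k₂ ∈ suf := by
        rw [hc2]; exact List.mem_append.mpr (Or.inr List.mem_cons_self)
      have hk2key : k₂ ≠ key := fun he => hks (he ▸ hk2s)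
      have hk2pre : k₂ ∉ pre := fun hp => hdisj k₂ hp hk2s
      obtain ⟨hp, hn⟩ := hptr (pre ++ key :: cs) k₂ suf₂ (by rw [hc2]; simp)
      constructor
      · -- the prv pointer of k₂
        rw [get?_erase_of_ne _ _ _ hk2key]
        cases hcs : cs with
        | nil =>
            have hsh : suf.head? = some k₂ := by rw [hc2, hcs]; rfl
            rw [hsh]; simp only [insOpt]
            rw [PySem.Dict.get?_insert_self, hc1, hcs, List.append_nil]
        | cons a cs' =>
            have hcsne : cs ≠ [] := by rw [hcs]; exact List.cons_ne_nil a cs'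
            have hsh : suf.head? = some a := by rw [hc2, hcs]; rfl
            have hk2cs : k₂ ∉ cs := by
              have hsnd' : (cs ++ k₂ :: suf₂).Nodup := by rw [← hc2]; exact hsnd
              exact (nodup_mid hsnd').1
            have hk2a : k₂ ≠ a := fun he => hk2cs (by rw [hcs, he]; exact List.mem_cons_self)
            have e1 : (pre ++ key :: cs).getLast? = cs.getLast? := by
              rw [show pre ++ key :: cs = (pre ++ [key]) ++ cs from by simp,
                getLast?_append_of_ne_nil _ hcsne]
            have e2 : pre₂.getLast? = cs.getLast? := by
              rw [hc1, getLast?_append_of_ne_nil _ hcsne]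
            rw [hsh]; simp only [insOpt]
            rw [PySem.Dict.get?_insert_of_ne _ _ hk2a, hp, e1, e2]
      · -- the nxt pointer of k₂ is untouched
        rw [get?_erase_of_ne _ _ _ hk2key]
        cases hph : pre.getLast? with
        | none => simp only [insOpt]; rw [hn]
        | some kp =>
            have hkpmem : kp ∈ pre := by
              obtain ⟨ys, hys⟩ := List.getLast?_eq_some_iff.mp hph
              rw [hys]; exact List.mem_append.mpr (Or.inr List.mem_cons_self)
            have hk2kp : k₂ ≠ kp := fun he => hk2pre (he ▸ hkpmem)
            simp only [insOpt]
            rw [PySem.Dict.get?_insert_of_ne _ _ hk2kp, hn]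
    · -- pre = pre₂ ++ bs, k₂ :: suf₂ = bs ++ suf
      cases hbs : bs with
      | nil =>
          -- pre = pre₂, suf = k₂ :: suf₂ : k₂ is the spliced-in successor
          rw [hbs, List.append_nil] at hb1
          have hsuf : suf = k₂ :: suf₂ := by
            rw [hbs] at hb2; exact (by simpa using hb2 : k₂ :: suf₂ = suf).symm
          have hpe : pre₂ = pre := hb1.symm
          have hk2key : k₂ ≠ key := fun he => hks (he ▸ (hsuf ▸ List.mem_cons_self))
          constructor
          · rw [get?_erase_of_ne _ _ _ hk2key, hsuf]
            simp only [List.head?_cons, insOpt]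
            rw [PySem.Dict.get?_insert_self, hpe]
          · rw [get?_erase_of_ne _ _ _ hk2key]
            obtain ⟨hp, hn⟩ := hptr (pre ++ [key]) k₂ suf₂ (by rw [hsuf]; simp)
            cases hph : pre.getLast? with
            | none => simp only [insOpt]; rw [hn]
            | some kp =>
                have hkpmem : kp ∈ pre := by
                  obtain ⟨ys, hys⟩ := List.getLast?_eq_some_iff.mp hph
                  rw [hys]; exact List.mem_append.mpr (Or.inr List.mem_cons_self)
                have hk2s : k₂ ∈ suf := by rw [hsuf]; exact List.mem_cons_self
                have hk2kp : k₂ ≠ kp := fun he => hdisj kp hkpmem (he ▸ hk2s)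
                simp only [insOpt]
                rw [PySem.Dict.get?_insert_of_ne _ _ hk2kp, hn]
      | cons b bs' =>
          -- pre = pre₂ ++ k₂ :: bs' : k₂ sits inside pre
          rw [hbs] at hb1 hb2
          rw [List.cons_append] at hb2
          obtain ⟨hbk, hb2'⟩ := List.cons_eq_cons.mp hb2
          subst hbk
          have hpre : pre = pre₂ ++ k₂ :: bs' := hb1
          have hk2pre : k₂ ∈ pre := by
            rw [hpre]; exact List.mem_append.mpr (Or.inr List.mem_cons_self)
          have hk2key : k₂ ≠ key := fun he => hkp (he ▸ hk2pre)
          obtain ⟨hp, hn⟩ := hptr pre₂ k₂ (bs' ++ key :: suf) (by rw [hpre]; simp)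
          constructor
          · -- the prv pointer of k₂ is untouched
            rw [get?_erase_of_ne _ _ _ hk2key]
            cases hsh : suf.head? with
            | none => simp only [insOpt]; rw [hp]
            | some kn =>
                have hknmem : kn ∈ suf := by
                  cases suf with
                  | nil => simp at hsh
                  | cons a s => exact (by simpa using hsh : a = kn) ▸ List.mem_cons_self
                have hk2kn : k₂ ≠ kn := fun he => hdisj k₂ hk2pre (he ▸ hknmem)
                simp only [insOpt]
                rw [PySem.Dict.get?_insert_of_ne _ _ hk2kn, hp]
          · -- the nxt pointer of k₂
            rw [get?_erase_of_ne _ _ _ hk2key, hb2']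
            rcases List.eq_nil_or_concat bs' with rfl | ⟨t₀, tl, rfl⟩
            · -- k₂ was key's predecessor: its nxt is rewired to suf.head?
              have hph : pre.getLast? = some k₂ := by rw [hpre]; simp
              rw [hph]; simp only [insOpt]
              rw [PySem.Dict.get?_insert_self]
              cases suf <;> rfl
            · -- k₂ keeps its successor inside bs'
              simp only [List.concat_eq_append] at *
              have hph : pre.getLast? = some tl := by
                rw [hpre, show pre₂ ++ k₂ :: (t₀ ++ [tl]) = (pre₂ ++ k₂ :: t₀) ++ [tl] from by simp,
                  List.getLast?_concat]
              have hk2bs : k₂ ∉ t₀ ++ [tl] := by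
                have hpnd' : (pre₂ ++ k₂ :: (t₀ ++ [tl])).Nodup := by rw [← hpre]; exact hpnd
                exact (nodup_mid hpnd').2.1
              have hk2tl : k₂ ≠ tl := fun he =>
                hk2bs (he ▸ List.mem_append.mpr (Or.inr List.mem_cons_self))
              rw [hph]; simp only [insOpt]
              rw [PySem.Dict.get?_insert_of_ne _ _ hk2tl, hn,
                head?_append_of_ne_nil (key :: suf) (by simp),
                head?_append_of_ne_nil suf (by simp)]

-- A's prev/next answers, characterised against B's pointer dicts
theorem get_sim (tbl : PySem.Dict Int (List (String × String))) (val : PySem.Dict String String)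
    (key : String) (ht : tbl.getD 0 [] = val.items) :
    hmGetA tbl key = val.getD key "<none>" := by
  unfold hmGetA
  rw [hmHashIdx_eq, ht, bucketGetA_eq]

theorem prevA_eq (tbl : PySem.Dict Int (List (String × String))) (val : PySem.Dict String String)
    (prv nxt : PySem.Dict String (Option String)) (last : Option String) (key : String)
    (ht : tbl.getD 0 [] = val.items) (hlink : LinkOK prv nxt last val.keys) :
    hmPrevA tbl val.keys key =
      (if val.contains key then lookupOpt val (prv.getD key none) else "<none>") := by
  by_cases hmem : key ∈ val.keys
  · have hcont : val.contains key = true := (PySem.Dict.contains_iff_mem_keys val key).mpr hmem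
    rw [if_pos hcont]
    obtain ⟨i, hidx⟩ := Option.isSome_iff_exists.mp ((PySem.List.index?_isSome_iff _ _).mpr hmem)
    obtain ⟨pre, suf, hks, hlen, -⟩ := (PySem.List.index?_eq_some_iff _ _ _).mp hidx
    have hpd : prv.getD key none = pre.getLast? :=
      PySem.Dict.getD_of_get?_eq_some _ _ (hlink.2 pre key suf hks).1
    rw [hpd]
    unfold hmPrevA
    rw [if_pos hmem, hidx]
    dsimp only
    cases hpl : pre.getLast? with
    | none =>
        have hpre0 : pre = [] := List.getLast?_eq_none_iff.mp hpl
        have hi0 : i = 0 := by rw [hpre0] at hlen; simpa using hlen.symm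
        rw [if_neg (by omega)]
        simp [lookupOpt]
    | some kp =>
        have hpne : pre ≠ [] := fun he => by simp [he] at hpl
        have hppos : 0 < pre.length := List.length_pos_iff.mpr hpne
        rw [if_pos (by omega)]
        have hget : val.keys[i - 1]? = some kp := by
          rw [hks, List.getElem?_append_left (by omega), ← hlen,
            ← List.getLast?_eq_getElem?, hpl]
        rw [hget]
        simp only [lookupOpt, Option.elim]
        show hmGetA tbl kp = _
        rw [get_sim tbl val kp ht]
  · have hcont : val.contains key = false :=
      Bool.eq_false_iff.mpr (fun hc => hmem ((PySem.Dict.contains_iff_mem_keys val key).mp hc))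
    rw [if_neg (ne_true_of_eq_false hcont)]
    unfold hmPrevA
    rw [if_neg hmem]

theorem nextA_eq (tbl : PySem.Dict Int (List (String × String))) (val : PySem.Dict String String)
    (prv nxt : PySem.Dict String (Option String)) (last : Option String) (key : String)
    (ht : tbl.getD 0 [] = val.items) (hlink : LinkOK prv nxt last val.keys) :
    hmNextA tbl val.keys key =
      (if val.contains key then lookupOpt val (nxt.getD key none) else "<none>") := by
  by_cases hmem : key ∈ val.keys
  · have hcont : val.contains key = true := (PySem.Dict.contains_iff_mem_keys val key).mpr hmem
    rw [if_pos hcont]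
    obtain ⟨i, hidx⟩ := Option.isSome_iff_exists.mp ((PySem.List.index?_isSome_iff _ _).mpr hmem)
    obtain ⟨pre, suf, hks, hlen, -⟩ := (PySem.List.index?_eq_some_iff _ _ _).mp hidx
    have hnd : nxt.getD key none = suf.head? :=
      PySem.Dict.getD_of_get?_eq_some _ _ (hlink.2 pre key suf hks).2
    rw [hnd]
    unfold hmNextA
    rw [if_pos hmem, hidx]
    dsimp only
    have hlenks : val.keys.length = pre.length + 1 + suf.length := by
      rw [hks]; simp [List.length_append]; omega
    cases hsh : suf.head? with
    | none =>
        have hs0 : suf = [] := List.head?_eq_none_iff.mp hsh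
        have : suf.length = 0 := by rw [hs0]; rfl
        rw [if_neg (by omega)]
        simp [lookupOpt]
    | some kn =>
        have hsne : suf ≠ [] := fun he => by simp [he] at hsh
        have hspos : 0 < suf.length := List.length_pos_iff.mpr hsne
        rw [if_pos (by omega)]
        have hget : val.keys[i + 1]? = some kn := by
          rw [hks, List.getElem?_append_right (by omega), ← hlen]
          cases suf with
          | nil => exact absurd rfl hsne
          | cons a s =>
              have ha : a = kn := by simpa using hsh
              subst ha
              simp
        rw [hget]
        simp only [lookupOpt, Option.elim]
        show hmGetA tbl kn = _
        rw [get_sim tbl val kn ht]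
  · have hcont : val.contains key = false :=
      Bool.eq_false_iff.mpr (fun hc => hmem ((PySem.Dict.contains_iff_mem_keys val key).mp hc))
    rw [if_neg (ne_true_of_eq_false hcont)]
    unfold hmNextA
    rw [if_neg hmem]

-- the simulation, operation by operation
theorem put_sim (tbl : PySem.Dict Int (List (String × String))) (val : PySem.Dict String String)
    (prv nxt : PySem.Dict String (Option String)) (last : Option String)
    (key value : String) (ht : tbl.getD 0 [] = val.items) (hnd : val.keys.Nodup)
    (hlink : LinkOK prv nxt last val.keys) :
    (val.contains key = true →
      SimRel (hmPutA tbl val.keys key value).1 (hmPutA tbl val.keys key value).2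
        (val.insert key value) prv nxt last) ∧
    (val.contains key = false →
      SimRel (hmPutA tbl val.keys key value).1 (hmPutA tbl val.keys key value).2
        (val.insert key value) (prv.insert key last)
        (insOpt (nxt.insert key none) last (some key)) (some key)) := by
  have hkn : (val.items.map (fun p => p.1)).Nodup := hnd
  constructor
  · intro hcont
    have hmem : key ∈ val.keys := (PySem.Dict.contains_iff_mem_keys val key).mp hcont
    simp only [hmPutA, hmHashIdx_eq, ht]
    rw [bucketPutA_mem key value val.items hkn hmem]
    refine ⟨?_, ?_, ?_, ?_⟩
    · rw [PySem.Dict.getD_insert_self, PySem.Dict.items_insert_of_contains val value hcont]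
    · rw [PySem.Dict.keys_insert_of_contains val value hcont]
    · rw [PySem.Dict.keys_insert_of_contains val value hcont]; exact hnd
    · rw [PySem.Dict.keys_insert_of_contains val value hcont]; exact hlink
  · intro hcont
    have hmem : key ∉ val.keys :=
      fun hm => by rw [(PySem.Dict.contains_iff_mem_keys val key).mpr hm] at hcont; cases hcont
    simp only [hmPutA, hmHashIdx_eq, ht]
    rw [bucketPutA_not_mem key value val.items hmem]
    refine ⟨?_, ?_, ?_, ?_⟩
    · rw [PySem.Dict.getD_insert_self, PySem.Dict.items_insert_of_not_contains val value hcont]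
    · rw [PySem.Dict.keys_insert_of_not_contains val value hcont]
    · exact PySem.Dict.nodup_keys_insert _ _ _ hnd
    · rw [PySem.Dict.keys_insert_of_not_contains val value hcont]
      exact putB_link prv nxt last val.keys key hmem hnd hlink

theorem del_sim (tbl : PySem.Dict Int (List (String × String))) (val : PySem.Dict String String)
    (prv nxt : PySem.Dict String (Option String)) (last : Option String)
    (key : String) (pre suf : List String) (hks : val.keys = pre ++ key :: suf)
    (ht : tbl.getD 0 [] = val.items) (hnd : val.keys.Nodup)
    (hlink : LinkOK prv nxt last val.keys) :
    SimRel (hmDelA tbl val.keys key).1 (hmDelA tbl val.keys key).2 (val.erase key)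
      ((insOpt prv suf.head? pre.getLast?).erase key)
      ((insOpt nxt pre.getLast? suf.head?).erase key)
      (newLast suf.head? last pre.getLast?) := by
  have hkn : (val.items.map (fun p => p.1)).Nodup := hnd
  have hnd' : (pre ++ key :: suf).Nodup := by rw [← hks]; exact hnd
  have hlink' : LinkOK prv nxt last (pre ++ key :: suf) := by rw [← hks]; exact hlink
  have hmem : key ∈ val.keys := by
    rw [hks]; exact List.mem_append.mpr (Or.inr List.mem_cons_self)
  obtain ⟨hdel, herase⟩ := bucketDelA_mem key val.items hkn hmem
  have hkeyse : val.keys.erase key = (val.erase key).keys := herase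
  have hkeyse2 : (val.erase key).keys = pre ++ suf := by
    rw [← hkeyse, hks, List.erase_append_right _ (nodup_mid hnd').1, List.erase_cons_head]
  simp only [hmDelA, hmHashIdx_eq, ht]
  rw [hdel, PySem.List.remove?_eq_some_erase _ _ hmem]
  refine ⟨?_, ?_, ?_, ?_⟩
  · rw [PySem.Dict.getD_insert_self]; rfl
  · exact hkeyse
  · rw [hkeyse2]
    exact List.Nodup.sublist ((List.sublist_cons_self key suf).append_left pre) hnd'
  · rw [hkeyse2]
    exact delB_link prv nxt last pre suf key hnd' hlink'

theorem step_sim (tbl : PySem.Dict Int (List (String × String))) (order : List String)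
    (val : PySem.Dict String String) (prv nxt : PySem.Dict String (Option String))
    (last : Option String) (res : List String) (op : String)
    (h : SimRel tbl order val prv nxt last) :
    (stepA ((tbl, order), res) op).2 = (stepB ((val, prv, nxt, last), res) op).2 ∧
    SimRel (stepA ((tbl, order), res) op).1.1 (stepA ((tbl, order), res) op).1.2
      (stepB ((val, prv, nxt, last), res) op).1.1
      (stepB ((val, prv, nxt, last), res) op).1.2.1
      (stepB ((val, prv, nxt, last), res) op).1.2.2.1
      (stepB ((val, prv, nxt, last), res) op).1.2.2.2 := by
  obtain ⟨ht, ho, hnd, hlink⟩ := h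
  subst ho
  simp only [stepA, stepB, split0_strip]
  cases hc : PySem.List.pyGet? (PySem.Str.split₀ op) 0 with
  | none => exact ⟨rfl, ht, rfl, hnd, hlink⟩
  | some command =>
    dsimp only
    by_cases h1 : command = "put"
    · rw [if_pos h1, if_pos h1]
      cases hk : PySem.List.pyGet? (PySem.Str.split₀ op) 1 with
      | none =>
          cases hv : PySem.List.pyGet? (PySem.Str.split₀ op) 2 with
          | none => exact ⟨rfl, ht, rfl, hnd, hlink⟩
          | some value => exact ⟨rfl, ht, rfl, hnd, hlink⟩
      | some key =>
          cases hv : PySem.List.pyGet? (PySem.Str.split₀ op) 2 with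
          | none => exact ⟨rfl, ht, rfl, hnd, hlink⟩
          | some value =>
              obtain ⟨hsim1, hsim2⟩ := put_sim tbl val prv nxt last key value ht hnd hlink
              dsimp only
              by_cases hcont : val.contains key = true
              · rw [if_pos hcont]
                exact ⟨rfl, hsim1 hcont⟩
              · have hcf : val.contains key = false := by
                  revert hcont; cases val.contains key <;> simp
                rw [if_neg hcont]
                exact ⟨rfl, hsim2 hcf⟩
    · rw [if_neg h1, if_neg h1]
      by_cases h2 : command = "get"
      · rw [if_pos h2, if_pos h2]
        cases hk : PySem.List.pyGet? (PySem.Str.split₀ op) 1 with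
        | none => exact ⟨rfl, ht, rfl, hnd, hlink⟩
        | some key =>
            refine ⟨?_, ht, rfl, hnd, hlink⟩
            show res ++ [hmGetA tbl key] = res ++ [val.getD key "<none>"]
            rw [get_sim tbl val key ht]
      · rw [if_neg h2, if_neg h2]
        by_cases h3 : command = "delete"
        · rw [if_pos h3, if_pos h3]
          cases hk : PySem.List.pyGet? (PySem.Str.split₀ op) 1 with
          | none => exact ⟨rfl, ht, rfl, hnd, hlink⟩
          | some key =>
              dsimp only
              by_cases hcont : val.contains key = true
              · rw [if_pos hcont]
                have hmem : key ∈ val.keys := (PySem.Dict.contains_iff_mem_keys val key).mp hcont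
                obtain ⟨pre, suf, hks⟩ := List.append_of_mem hmem
                have hp := (hlink.2 pre key suf hks).1
                have hn := (hlink.2 pre key suf hks).2
                rw [hp, hn]
                dsimp only
                exact ⟨rfl, del_sim tbl val prv nxt last key pre suf hks ht hnd hlink⟩
              · have hcf : val.contains key = false := by
                  revert hcont; cases val.contains key <;> simp
                rw [if_neg hcont]
                have hmem : key ∉ val.keys := fun hm => by
                  rw [(PySem.Dict.contains_iff_mem_keys val key).mpr hm] at hcf; cases hcf
                have hA : hmDelA tbl val.keys key = (tbl, val.keys) := by
                  simp only [hmDelA, hmHashIdx_eq, ht]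
                  rw [bucketDelA_not_mem key val.items hmem]
                rw [hA]
                exact ⟨rfl, ht, rfl, hnd, hlink⟩
        · rw [if_neg h3, if_neg h3]
          by_cases h4 : command = "prev"
          · rw [if_pos h4, if_pos h4]
            cases hk : PySem.List.pyGet? (PySem.Str.split₀ op) 1 with
            | none => exact ⟨rfl, ht, rfl, hnd, hlink⟩
            | some key =>
                refine ⟨?_, ht, rfl, hnd, hlink⟩
                show res ++ [hmPrevA tbl val.keys key] = res ++ [_]
                rw [prevA_eq tbl val prv nxt last key ht hlink]
          · rw [if_neg h4, if_neg h4]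
            by_cases h5 : command = "next"
            · rw [if_pos h5, if_pos h5]
              cases hk : PySem.List.pyGet? (PySem.Str.split₀ op) 1 with
              | none => exact ⟨rfl, ht, rfl, hnd, hlink⟩
              | some key =>
                  refine ⟨?_, ht, rfl, hnd, hlink⟩
                  show res ++ [hmNextA tbl val.keys key] = res ++ [_]
                  rw [nextA_eq tbl val prv nxt last key ht hlink]
            · rw [if_neg h5, if_neg h5]
              exact ⟨rfl, ht, rfl, hnd, hlink⟩

theorem loop_sim (ops : List String) (tbl : PySem.Dict Int (List (String × String)))
    (order : List String) (val : PySem.Dict String String)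
    (prv nxt : PySem.Dict String (Option String)) (last : Option String) (res : List String)
    (h : SimRel tbl order val prv nxt last) :
    (ops.foldl stepA ((tbl, order), res)).2 =
    (ops.foldl stepB ((val, prv, nxt, last), res)).2 := by
  induction ops generalizing tbl order val prv nxt last res with
  | nil => rfl
  | cons op rest ih =>
      obtain ⟨h2, h3⟩ := step_sim tbl order val prv nxt last res op h
      rw [List.foldl_cons, List.foldl_cons,
        show stepA ((tbl, order), res) op =
          (((stepA ((tbl, order), res) op).1.1, (stepA ((tbl, order), res) op).1.2),
            (stepB ((val, prv, nxt, last), res) op).2) from by rw [← h2],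
        show stepB ((val, prv, nxt, last), res) op =
          (((stepB ((val, prv, nxt, last), res) op).1.1,
            (stepB ((val, prv, nxt, last), res) op).1.2.1,
            (stepB ((val, prv, nxt, last), res) op).1.2.2.1,
            (stepB ((val, prv, nxt, last), res) op).1.2.2.2),
            (stepB ((val, prv, nxt, last), res) op).2) from rfl]
      exact ih _ _ _ _ _ _ _ h3

-- ===== VERDICT (by name: the statement is the Claim_ definition above) =====
theorem op_manager_spec : Claim_equal_op_manager := by
  intro operations _hdom _hpre
  unfold Spec_op_manager op_manager op_manager_alt
  exact loop_sim operations _ _ _ _ _ _ _ ⟨rfl, rfl, List.nodup_nil, rfl, by intro pre k suf h; simp at h⟩
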